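-- pv_equiv track=rewrite | github.com/HaHyunkyung/Hello_Python | 과일 장수.py | solution
-- ===== SOURCE A (Python) =====
-- def solution(k, m, score):
--     answer = 0
--     mod = int(len(score))%m
--     score.sort(reverse=True)
--
--     for i in range(0,int(len(score)-mod),m):
--         box = []
--         for j in range(i, i+m,1):
--             box.append(score[j])
--
--         answer += min(box)*m
--     return answer
-- ===== SOURCE B (Python) =====
-- def solution(k, m, score):
--     # Simpler: after the same in-place descending sort, each full box's minimum
--     # is its last element, so sum the strided minima directly (single pass).
--     score.sort(reverse=True)
--     return m * sum(score[i] for i in range(m - 1, len(score), m))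
-- ===== Notes on version B (the rewrite author's own statement) =====
-- stated objective: simpler
-- what changed: Instead of building each m-element box list and calling min() in a nested loop, B uses the fact that after the descending sort each full box's minimum is its last element and sums score[m-1], score[2m-1], ... in a single strided pass.
import Mathlib
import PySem

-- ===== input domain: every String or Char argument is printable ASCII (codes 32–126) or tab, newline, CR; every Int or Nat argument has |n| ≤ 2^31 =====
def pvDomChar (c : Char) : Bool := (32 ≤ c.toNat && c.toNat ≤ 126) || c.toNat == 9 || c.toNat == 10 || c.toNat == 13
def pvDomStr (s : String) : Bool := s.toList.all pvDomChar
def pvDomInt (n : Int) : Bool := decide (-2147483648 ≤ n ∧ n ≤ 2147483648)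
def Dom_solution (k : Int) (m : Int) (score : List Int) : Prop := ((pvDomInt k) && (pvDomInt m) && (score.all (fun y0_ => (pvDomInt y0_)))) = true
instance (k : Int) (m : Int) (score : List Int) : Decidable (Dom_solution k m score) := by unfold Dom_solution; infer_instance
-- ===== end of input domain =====

-- B: after the same in-place descending sort, each full box's minimum is its last element,
-- so B sums the strided minima in one pass instead of building each box and taking min().
-- Both A and B sort `score` in place; the equivalence proved is about the return value.


-- ===== PORT A =====
def solution (k : Int) (m : Int) (score : List Int) : Int :=
  let answer : Int := 0
  let md := PySem.Int.mod (PySem.List.len score) m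
  let s := PySem.List.sorted score (fun x => x) true
  (PySem.List.pyRange 0 (PySem.List.len score - md) m).foldl
    (fun answer i =>
      let box := (PySem.List.pyRange i (i + m) 1).foldl
        (fun box j => box ++ [PySem.List.pyGetD s j 0]) ([] : List Int)
      answer + ((PySem.List.min? box (fun x => x)).getD 0) * m)
    answer

-- ===== PORT B =====
def solution_alt (k : Int) (m : Int) (score : List Int) : Int :=
  let s := PySem.List.sorted score (fun x => x) true
  m * ((PySem.List.pyRange (m - 1) (PySem.List.len s) m).map
        (fun i => PySem.List.pyGetD s i 0)).sum

-- ===== PRECONDITION & SPEC =====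
-- Pre_ excludes exactly m = 0, where A raises ZeroDivisionError (and B ValueError).
def Pre_solution (k : Int) (m : Int) (score : List Int) : Prop := m ≠ 0
instance (k : Int) (m : Int) (score : List Int) : Decidable (Pre_solution k m score) := by unfold Pre_solution; infer_instance
def pvWitness_solution : Int × Int × List Int := (0, 3, [1, 2, 3, 1])

def Spec_solution (k : Int) (m : Int) (score : List Int) (out : Int) : Prop := out = solution_alt k m score
instance (k : Int) (m : Int) (score : List Int) (out : Int) : Decidable (Spec_solution k m score out) := by unfold Spec_solution; infer_instance

-- ===== CLAIM (what is proved, stated in full; the proofs are below) =====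
def Claim_equal_solution : Prop := ∀ (k : Int) (m : Int) (score : List Int), Dom_solution k m score → Pre_solution k m score → Spec_solution k m score (solution k m score)

-- ===== LEMMAS AND PROOFS =====

-- range(a, b, step) is empty for a negative step when a ≤ b
lemma pyRange_nil_of_neg (a b step : Int) (hs : step < 0) (hab : a ≤ b) :
    PySem.List.pyRange a b step = [] := by
  unfold PySem.List.pyRange
  split_ifs with h1 h2 h3 <;> first | rfl | omega

-- in a descending (Pairwise ≥) list, the minimum of the window [i, i+m) is its last element
lemma minbox_eq_last (s : List Int) (i m : Int)
    (hdesc : s.Pairwise (fun a b => b ≤ a)) (hi : 0 ≤ i) (hm : 0 < m)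
    (hend : i + m ≤ (s.length : Int)) :
    ((PySem.List.min? ((PySem.List.pyRange i (i + m) 1).map
        (fun j => PySem.List.pyGetD s j 0)) (fun x => x)).getD 0)
      = PySem.List.pyGetD s (i + m - 1) 0 := by
  set box := (PySem.List.pyRange i (i + m) 1).map (fun j => PySem.List.pyGetD s j 0) with hbox
  have hne : box ≠ [] := by
    simp only [hbox, ne_eq, List.map_eq_nil_iff]
    rw [PySem.List.pyRange_one]
    simp only [List.map_eq_nil_iff, List.range_eq_nil]
    omega
  obtain ⟨v, hv⟩ : ∃ v, PySem.List.min? box (fun x => x) = some v := by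
    cases h : PySem.List.min? box (fun x => x) with
    | none => exact absurd ((PySem.List.min?_eq_none_iff box _).mp h) hne
    | some v => exact ⟨v, rfl⟩
  have hlastmem : PySem.List.pyGetD s (i + m - 1) 0 ∈ box := by
    rw [hbox]
    exact List.mem_map_of_mem (PySem.List.mem_pyRange_one.mpr (by omega))
  have hle : v ≤ PySem.List.pyGetD s (i + m - 1) 0 :=
    PySem.List.min?_isMin hv _ hlastmem
  have hge : PySem.List.pyGetD s (i + m - 1) 0 ≤ v := by
    have hmem := PySem.List.min?_mem hv
    rw [hbox] at hmem
    obtain ⟨j, hj, hjv⟩ := List.mem_map.mp hmem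
    have hjb := PySem.List.mem_pyRange_one.mp hj
    have h1 : PySem.List.pyGetD s j 0 = s[j.toNat]'(by omega) := by
      rw [PySem.List.pyGetD_eq_getElem s 0 (by omega) (by omega)]
    have h2 : PySem.List.pyGetD s (i + m - 1) 0 = s[(i + m - 1).toNat]'(by omega) := by
      rw [PySem.List.pyGetD_eq_getElem s 0 (by omega) (by omega)]
    rw [← hjv, h1, h2]
    rcases eq_or_lt_of_le (show j ≤ i + m - 1 by omega) with heq | hlt
    · subst heq; exact le_refl _
    · exact List.pairwise_iff_getElem.mp hdesc j.toNat (i + m - 1).toNat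
        (by omega) (by omega) (by omega)
  rw [hv, Option.getD_some]
  omega

-- core identity: both programs over the already-sorted list
lemma main_eq (k m : Int) (score : List Int) (hm : m ≠ 0) :
    solution k m score = solution_alt k m score := by
  unfold solution solution_alt
  simp only [PySem.List.len_eq, PySem.List.length_sorted]
  set s := PySem.List.sorted score (fun x => x) true with hs
  have hlen : s.length = score.length := PySem.List.length_sorted score _ true
  set L : Int := (score.length : Int) with hL
  have hL0 : 0 ≤ L := by positivity
  rcases lt_or_gt_of_ne hm with hneg | hpos
  · -- m < 0: both ranges are empty
    have hmod := PySem.Int.mod_neg_bounds (a := L) hneg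
    rw [pyRange_nil_of_neg _ _ _ hneg (by omega),
        pyRange_nil_of_neg _ _ _ hneg (by omega)]
    simp
  · -- m > 0
    have hq0 : 0 ≤ L / m := Int.ediv_nonneg hL0 (le_of_lt hpos)
    set n : Nat := (L / m).toNat with hn
    have hnL : m * (n : Int) ≤ L := by
      have := Int.ediv_mul_le L (ne_of_gt hpos)
      rw [hn]; rw [Int.toNat_of_nonneg hq0]; linarith [Int.ediv_mul_le L (ne_of_gt hpos)]
    -- A's range
    have hmodL : PySem.Int.mod L m = L % m := PySem.Int.mod_eq_emod_of_pos hpos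
    have hLmod : L - PySem.Int.mod L m = m * (L / m) := by
      rw [hmodL]; have := Int.mul_ediv_add_emod L m; omega
    have hA : PySem.List.pyRange 0 (L - PySem.Int.mod L m) m
        = List.map (fun t : Nat => 0 + m * (t : Int)) (List.range n) := by
      rw [PySem.List.pyRange_of_pos _ _ hpos]
      have hcnt : (if (0:Int) < L - PySem.Int.mod L m then ((L - PySem.Int.mod L m - 0 + m - 1) / m).toNat else 0) = n := by
        rw [hLmod]
        by_cases hc : (0 : Int) < m * (L / m)
        · rw [if_pos hc]
          have : (m * (L / m) - 0 + m - 1) / m = L / m := by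
            have h1 : m * (L / m) - 0 + m - 1 = (m - 1) + m * (L / m) := by ring
            rw [h1, Int.add_mul_ediv_left _ _ (ne_of_gt hpos),
                Int.ediv_eq_zero_of_lt (by omega) (by omega)]
            omega
          rw [this, hn]
        · rw [if_neg hc]
          have : L / m = 0 := by nlinarith [hq0]
          omega
      rw [hcnt]
    -- B's range
    have hB : PySem.List.pyRange (m - 1) L m
        = List.map (fun t : Nat => (m - 1) + m * (t : Int)) (List.range n) := by
      rw [PySem.List.pyRange_of_pos _ _ hpos]
      have hcnt : (if m - 1 < L then ((L - (m - 1) + m - 1) / m).toNat else 0) = n := by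
        by_cases hc : m - 1 < L
        · rw [if_pos hc]
          have : L - (m - 1) + m - 1 = L := by ring
          rw [this, hn]
        · rw [if_neg hc]
          have : L / m = 0 := Int.ediv_eq_zero_of_lt hL0 (by omega)
          omega
      rw [hcnt]
    rw [hA, hB, List.foldl_map, PySem.List.foldl_add, List.map_map]
    simp only [zero_add]
    have hterm : ∀ t ∈ List.range n,
        ((PySem.List.min? ((PySem.List.pyRange (m * (t : Int)) (m * (t : Int) + m) 1).foldl
            (fun box j => box ++ [PySem.List.pyGetD s j 0]) []) (fun x => x)).getD 0) * m
          = PySem.List.pyGetD s ((m - 1) + m * (t : Int)) 0 * m := by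
      intro t ht
      have htn : t < n := List.mem_range.mp ht
      have hend : m * (t : Int) + m ≤ (s.length : Int) := by
        have : m * ((t : Int) + 1) ≤ m * (n : Int) := by
          apply mul_le_mul_of_nonneg_left _ (le_of_lt hpos)
          exact_mod_cast Nat.succ_le_of_lt htn
        rw [hlen, ← hL]; nlinarith
      rw [PySem.List.foldl_append_singleton_eq_map, List.nil_append,
          minbox_eq_last s (m * (t : Int)) m (PySem.List.sorted_pairwise_rev score _)
            (by positivity) hpos hend]
      congr 2
      ring
    simp only [Function.comp_def]
    rw [List.map_congr_left hterm, List.sum_map_mul_right]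
    ring

-- ===== VERDICT (by name: the statement is the Claim_ definition above) =====
theorem solution_spec : Claim_equal_solution := by
  intro k m score _ hpre
  unfold Spec_solution
  exact main_eq k m score hpre
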